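-- pv_equiv track=rewrite | github.com/fractalego/fewrel_zero_shot | rel_extract/aux_fewrel.py | join_consecutive_tuples
-- ===== SOURCE A (Python) =====
-- def join_consecutive_tuples(tuples):
--     for i in range(len(tuples) - 1):
--         curr_type = tuples[i][1]
--         curr_end_idx = tuples[i][2][1]
--         next_type = tuples[i + 1][1]
--         next_start_idx = tuples[i + 1][2][0]
--         if curr_type == next_type and curr_end_idx == next_start_idx - 1:
--             curr_word = tuples[i][0]
--             next_word = tuples[i + 1][0]
--             curr_start_idx = tuples[i][2][0]
--             next_end_idx = tuples[i + 1][2][1]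
--             tuples[i + 1] = (curr_word + ' ' + next_word,
--                              curr_type,
--                              (curr_start_idx, next_end_idx))
--             tuples[i] = ()
--     tuples = [t for t in tuples if t]
--     return tuples
-- ===== SOURCE B (Python) =====
-- def join_consecutive_tuples(tuples):
--     if not tuples:
--         return []
--     result = []
--     current = tuples[0]
--     for nxt in tuples[1:]:
--         if current[1] == nxt[1] and nxt[2][0] == current[2][1] + 1:
--             current = (current[0] + ' ' + nxt[0], current[1],
--                        (current[2][0], nxt[2][1]))
--         else:
--             result.append(current)
--             current = nxt
--     result.append(current)
--     return result
-- ===== Notes on version B (the rewrite author's own statement) =====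
-- stated objective: simpler
-- what changed: Builds a fresh output list with a single running accumulator instead of blanking merged slots in place with empty-tuple sentinels and filtering them out afterwards (and B does not mutate its argument).
import Mathlib
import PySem

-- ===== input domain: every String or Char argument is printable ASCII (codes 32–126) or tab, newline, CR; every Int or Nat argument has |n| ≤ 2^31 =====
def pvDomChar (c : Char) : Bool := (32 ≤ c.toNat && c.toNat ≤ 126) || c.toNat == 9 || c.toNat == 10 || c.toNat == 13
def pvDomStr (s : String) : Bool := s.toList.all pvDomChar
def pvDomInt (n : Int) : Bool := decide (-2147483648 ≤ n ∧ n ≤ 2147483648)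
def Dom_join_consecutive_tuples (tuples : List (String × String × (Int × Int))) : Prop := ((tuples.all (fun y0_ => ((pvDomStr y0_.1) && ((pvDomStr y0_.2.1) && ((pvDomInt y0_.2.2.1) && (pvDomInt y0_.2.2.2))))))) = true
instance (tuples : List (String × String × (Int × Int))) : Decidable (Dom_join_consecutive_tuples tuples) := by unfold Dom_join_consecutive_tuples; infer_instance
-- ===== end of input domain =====

-- B rebuilds the result with a single running accumulator instead of A's in-place
-- blank-and-filter pass (objective: simpler; return values proved equal; A also
-- mutates its argument list in Python, B does not — the claim is about the return value).

-- ===== PORT A =====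
-- A blanks a merged-away slot with the empty tuple () and filters falsy entries at
-- the end; () has no value of the element type, so the port marks such slots with
-- `none` over `Option` and the final falsy-filter is `filterMap id` — exact, since
-- input elements (3-tuples) are always truthy in Python.
def stepA (arr : List (Option (String × String × (Int × Int)))) (i : Nat) :
    List (Option (String × String × (Int × Int))) :=
  match arr[i]?, arr[i+1]? with
  | some (some (cw, ct, cs, ce)), some (some (nw, nt, ns, ne)) =>
    if ct == nt && ce == ns - 1 then
      (arr.set (i+1) (some (cw ++ " " ++ nw, ct, (cs, ne)))).set i none
    else arr
  | _, _ => arr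

def join_consecutive_tuples (tuples : List (String × String × (Int × Int))) :
    List (String × String × (Int × Int)) :=
  (((List.range (tuples.length - 1)).foldl stepA (tuples.map some))).filterMap id

-- ===== PORT B =====
def goB (cur : String × String × (Int × Int)) :
    List (String × String × (Int × Int)) → List (String × String × (Int × Int))
  | [] => [cur]
  | n :: rest =>
    if cur.2.1 == n.2.1 && n.2.2.1 == cur.2.2.2 + 1 then
      goB (cur.1 ++ " " ++ n.1, cur.2.1, (cur.2.2.1, n.2.2.2)) rest
    else cur :: goB n rest

def join_consecutive_tuples_alt (tuples : List (String × String × (Int × Int))) :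
    List (String × String × (Int × Int)) :=
  match tuples with
  | [] => []
  | t :: ts => goB t ts

-- ===== PRECONDITION & SPEC =====
def Spec_join_consecutive_tuples (tuples : List (String × String × (Int × Int))) (out : List (String × String × (Int × Int))) : Prop := out = join_consecutive_tuples_alt tuples
instance (tuples : List (String × String × (Int × Int))) (out : List (String × String × (Int × Int))) : Decidable (Spec_join_consecutive_tuples tuples out) := by unfold Spec_join_consecutive_tuples; infer_instance

-- ===== CLAIM (what is proved, stated in full; the proofs are below) =====
def Claim_equal_join_consecutive_tuples : Prop := ∀ (tuples : List (String × String × (Int × Int))), Dom_join_consecutive_tuples tuples → Spec_join_consecutive_tuples tuples (join_consecutive_tuples tuples)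

-- ===== LEMMAS AND PROOFS =====

theorem pv_getAt {α : Type} (done : List α) (x : α) (l : List α) :
    (done ++ x :: l)[done.length]? = some x := by
  induction done with
  | nil => rfl
  | cons d ds ih => simpa using ih

theorem pv_setAt {α : Type} (done : List α) (x : α) (l : List α) (y : α) :
    (done ++ x :: l).set done.length y = done ++ y :: l := by
  induction done with
  | nil => rfl
  | cons d ds ih => simpa using ih

theorem pv_getAt1 {α : Type} (done : List α) (x y : α) (l : List α) :
    (done ++ x :: y :: l)[done.length + 1]? = some y := by
  have := pv_getAt (done ++ [x]) y l
  simpa [List.append_assoc] using this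

theorem pv_setAt1 {α : Type} (done : List α) (x y : α) (l : List α) (z : α) :
    (done ++ x :: y :: l).set (done.length + 1) z = done ++ x :: z :: l := by
  have := pv_setAt (done ++ [x]) y l z
  simpa [List.append_assoc] using this

-- the main invariant: folding A's step over the remaining indices, starting from a
-- processed prefix `done`, the current accumulator slot and the untouched suffix,
-- yields (after the falsy-filter) the processed output followed by B's recursion.
theorem pv_main (rest : List (String × String × (Int × Int))) :
    ∀ (cur : String × String × (Int × Int))
      (done : List (Option (String × String × (Int × Int)))),
    ((List.range' done.length rest.length).foldl stepA
        (done ++ some cur :: rest.map some)).filterMap id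
      = done.filterMap id ++ goB cur rest := by
  induction rest with
  | nil => intro cur done; simp [goB]
  | cons n rest ih =>
    intro cur done
    obtain ⟨cw, ct, cs, ce⟩ := cur
    obtain ⟨nw, nt, ns, ne⟩ := n
    rw [List.map_cons, List.length_cons, List.range'_succ]
    have hstep : stepA (done ++ some (cw, ct, cs, ce) :: some (nw, nt, ns, ne) :: rest.map some) done.length
        = if ct == nt && ce == ns - 1 then
            done ++ none :: some (cw ++ " " ++ nw, ct, (cs, ne)) :: rest.map some
          else done ++ some (cw, ct, cs, ce) :: some (nw, nt, ns, ne) :: rest.map some := by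
      unfold stepA
      rw [pv_getAt, pv_getAt1]
      by_cases h : (ct == nt && ce == ns - 1) = true
      · simp only [h, if_true]
        rw [pv_setAt1, pv_setAt]
      · simp [h]
    rw [List.foldl_cons, hstep]
    by_cases h : (ct == nt && ce == ns - 1) = true
    · rw [if_pos h]
      have h2 : (done ++ [(none : Option (String × String × (Int × Int)))]).length = done.length + 1 := by simp
      have := ih (cw ++ " " ++ nw, ct, (cs, ne)) (done ++ [none])
      rw [h2, List.append_assoc] at this
      simp only [List.cons_append, List.nil_append] at this
      rw [this]
      have hb : (ct == nt && ns == ce + 1) = true := by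
        simp only [Bool.and_eq_true, beq_iff_eq] at h ⊢
        exact ⟨h.1, by omega⟩
      simp [goB, hb, List.filterMap_append]
    · rw [if_neg h]
      have h2 : (done ++ [some (cw, ct, cs, ce)]).length = done.length + 1 := by simp
      have := ih (nw, nt, ns, ne) (done ++ [some (cw, ct, cs, ce)])
      rw [h2, List.append_assoc] at this
      simp only [List.cons_append, List.nil_append] at this
      rw [this]
      have hb : (ct == nt && ns == ce + 1) = false := by
        rw [Bool.and_eq_true, not_and_or] at h
        rcases h with h | h
        · simp only [Bool.and_eq_false_iff]; left; simpa using h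
        · simp only [beq_iff_eq] at h
          simp only [Bool.and_eq_false_iff, beq_eq_false_iff_ne, ne_eq]
          right; omega
      simp [goB, hb, List.filterMap_append]

-- ===== VERDICT (by name: the statement is the Claim_ definition above) =====
theorem join_consecutive_tuples_spec : Claim_equal_join_consecutive_tuples := by
  intro tuples _
  unfold Spec_join_consecutive_tuples join_consecutive_tuples join_consecutive_tuples_alt
  match tuples with
  | [] => rfl
  | t :: ts =>
    have := pv_main ts t ([] : List (Option (String × String × (Int × Int))))
    simpa [List.range_eq_range'] using this
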